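-- pv_equiv track=rewrite | github.com/Flashwidow/perfomanslabtest | task1/task1.py | circular_array_path
-- ===== SOURCE A (Python) =====
-- def circular_array_path(n, m):
--     result = [] # Создаем пустой список для хранения пути
--     i = 1
--     while True:
--         result.append(i) # Добавляем текущую позицию в список пути
--         i = 1 + (i + m - 2) % n # Вычисляем следующую позицию в массиве
--         if i == 1:
--             break
--     return result
-- ===== SOURCE B (Python) =====
-- def _gcd(a, b):
--     a, b = abs(a), abs(b)
--     while b:
--         a, b = b, a % b
--     return a
--
-- def circular_array_path(n, m):
--     step = (m - 1) % n
--     cycle_len = abs(n) // _gcd(n, step)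
--     return [1 + (k * step) % n for k in range(cycle_len)]
-- ===== Notes on version B (the rewrite author's own statement) =====
-- stated objective: alternative
-- what changed: Replaces the incremental keep-stepping-until-back-at-1 loop (mutable position state, append, break test) with closed-form arithmetic: the cycle length is computed up front as abs(n)//gcd(n,(m-1)%n) and each position is produced directly as 1+(k*step)%n by a comprehension, no stepping state.
import Mathlib
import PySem

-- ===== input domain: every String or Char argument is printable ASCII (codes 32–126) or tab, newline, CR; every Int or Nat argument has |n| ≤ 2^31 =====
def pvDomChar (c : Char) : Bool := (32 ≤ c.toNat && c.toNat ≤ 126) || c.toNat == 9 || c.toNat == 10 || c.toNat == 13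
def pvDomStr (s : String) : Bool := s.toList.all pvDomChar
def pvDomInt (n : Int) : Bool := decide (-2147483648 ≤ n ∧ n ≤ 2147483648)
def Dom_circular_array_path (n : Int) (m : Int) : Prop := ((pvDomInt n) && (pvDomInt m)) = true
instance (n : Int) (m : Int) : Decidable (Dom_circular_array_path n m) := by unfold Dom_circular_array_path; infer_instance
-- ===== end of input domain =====

-- B replaces A's incremental stepping loop with closed-form arithmetic over a precomputed
-- cycle length |n| // gcd(n, (m-1) % n)  (alternative algorithm, similar cost).


-- ===== PORT A =====
-- the 'while True' loop of A; fuel n.natAbs suffices: the loop is back at position 1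
-- after at most |n| steps (proved below).  Fuel 0 is reached only when n = 0 (excluded
-- by Pre_: there Python raises ZeroDivisionError at '% n').
def circularLoopA (n : Int) (m : Int) : Nat → Int → List Int → List Int
  | 0, _, acc => acc
  | Nat.succ f, i, acc =>
    let acc' := acc ++ [i]                          -- result.append(i)
    let i' := 1 + PySem.Int.mod (i + m - 2) n       -- i = 1 + (i + m - 2) % n
    if i' = 1 then acc' else circularLoopA n m f i' acc'   -- if i == 1: break

def circular_array_path (n : Int) (m : Int) : List Int :=
  circularLoopA n m n.natAbs 1 []

-- ===== PORT B =====
-- _gcd(a, b) from Source B: abs both operands, then Euclid's while-loop.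
-- (After abs both values are ≥ 0, so Python's '%' here is exactly Nat '%'.)
def pyGcdLoop : Nat → Nat → Nat
  | a, 0 => a                                            -- while b: … exits
  | a, Nat.succ b => pyGcdLoop (Nat.succ b) (a % Nat.succ b)   -- a, b = b, a % b
termination_by _ b => b
decreasing_by exact Nat.mod_lt _ (Nat.succ_pos _)

def pyGcd (a : Int) (b : Int) : Int := (pyGcdLoop a.natAbs b.natAbs : Int)

def circular_array_path_alt (n : Int) (m : Int) : List Int :=
  let step := PySem.Int.mod (m - 1) n                    -- step = (m - 1) % n
  let cycleLen := PySem.Int.floordiv |n| (pyGcd n step)  -- cycle_len = abs(n) // _gcd(n, step)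
  (PySem.List.pyRange 0 cycleLen 1).map (fun k => 1 + PySem.Int.mod (k * step) n)

-- ===== PRECONDITION & SPEC =====
-- A raises ZeroDivisionError exactly when n = 0 (the '% n'); B raises there too.
def Pre_circular_array_path (n : Int) (m : Int) : Prop := n ≠ 0
instance (n : Int) (m : Int) : Decidable (Pre_circular_array_path n m) := by
  unfold Pre_circular_array_path; infer_instance

def pvWitness_circular_array_path : Int × Int := (5, 3)

def Spec_circular_array_path (n : Int) (m : Int) (out : List Int) : Prop := out = circular_array_path_alt n m
instance (n : Int) (m : Int) (out : List Int) : Decidable (Spec_circular_array_path n m out) := by unfold Spec_circular_array_path; infer_instance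

-- ===== CLAIM (what is proved, stated in full; the proofs are below) =====
def Claim_equal_circular_array_path : Prop := ∀ (n : Int) (m : Int), Dom_circular_array_path n m → Pre_circular_array_path n m → Spec_circular_array_path n m (circular_array_path n m)

-- ===== LEMMAS AND PROOFS =====

-- the common closed form: both ports produce [1 + (t*(m-1)) % n for t < |n| / gcd(n, m-1)]
def cycLen (n : Int) (m : Int) : Nat := n.natAbs / Int.gcd n (m - 1)

lemma pyGcdLoop_eq (a b : Nat) : pyGcdLoop a b = Nat.gcd b a := by
  fun_induction pyGcdLoop a b with
  | case1 a => simp [Nat.gcd_zero_left]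
  | case2 a b ih => rw [ih, Nat.gcd_succ]

lemma pyGcd_eq (n m : Int) : pyGcd n (PySem.Int.mod (m - 1) n) = (Int.gcd n (m - 1) : Int) := by
  unfold pyGcd
  rw [pyGcdLoop_eq]
  have h1 : Nat.gcd (PySem.Int.mod (m - 1) n).natAbs n.natAbs = Int.gcd n (PySem.Int.mod (m - 1) n) := by
    rw [Int.gcd]; exact Nat.gcd_comm _ _
  rw [h1]
  have h2 : PySem.Int.mod (m - 1) n = (m - 1) + n * (-(Int.fdiv (m - 1) n)) := by
    have := Int.fmod_add_mul_fdiv (m - 1) n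
    simp only [PySem.Int.mod]
    linarith
  rw [h2, Int.gcd_add_mul_left_right]

-- n ∣ k*(m-1) exactly at the multiples of the cycle length
lemma dvd_iff_cyc (n m : Int) (hn : n ≠ 0) (k : Nat) :
    n ∣ (k : Int) * (m - 1) ↔ cycLen n m ∣ k := by
  set N := n.natAbs with hN
  set S := (m - 1).natAbs with hS
  have hNpos : 0 < N := Int.natAbs_pos.mpr hn
  have hgpos : 0 < Nat.gcd N S := Nat.gcd_pos_of_pos_left _ hNpos
  have h1 : n ∣ (k : Int) * (m - 1) ↔ N ∣ k * S := by
    rw [← Int.natAbs_dvd_natAbs, Int.natAbs_mul, Int.natAbs_natCast]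
  rw [h1]
  have hcyc : cycLen n m = N / Nat.gcd N S := rfl
  rw [hcyc]
  set g := Nat.gcd N S with hgdef
  obtain ⟨N', hN'⟩ : g ∣ N := Nat.gcd_dvd_left _ _
  obtain ⟨S', hS'⟩ : g ∣ S := Nat.gcd_dvd_right _ _
  have hdivN : N / g = N' := by rw [hN']; exact Nat.mul_div_cancel_left _ hgpos
  have hcop : Nat.Coprime (N / g) (S / g) := Nat.coprime_div_gcd_div_gcd hgpos
  have hdivS : S / g = S' := by rw [hS']; exact Nat.mul_div_cancel_left _ hgpos
  rw [hdivN]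
  constructor
  · intro h
    have h2 : g * N' ∣ g * (k * S') := by
      rw [← hN']; convert h using 1; rw [hS']; ring
    have h3 : N' ∣ k * S' := (Nat.mul_dvd_mul_iff_left hgpos).mp h2
    exact (hdivN ▸ hdivS ▸ hcop : Nat.Coprime N' S').dvd_of_dvd_mul_right h3
  · rintro ⟨c, rfl⟩
    exact ⟨c * S', by rw [hN', hS']; ring⟩

lemma cycLen_pos (n m : Int) (hn : n ≠ 0) : 0 < cycLen n m := by
  have hNpos : 0 < n.natAbs := Int.natAbs_pos.mpr hn
  have hgpos : 0 < Int.gcd n (m - 1) := Nat.gcd_pos_of_pos_left _ hNpos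
  exact Nat.div_pos (Nat.le_of_dvd hNpos (Nat.gcd_dvd_left _ _)) hgpos

-- one loop step: from position 1 + (k*(m-1)) % n the update lands on 1 + ((k+1)*(m-1)) % n
lemma step_eq (n m : Int) (k : Nat) :
    PySem.Int.mod (1 + PySem.Int.mod ((k : Int) * (m - 1)) n + m - 2) n
      = PySem.Int.mod (((k : Int) + 1) * (m - 1)) n := by
  have h := Int.fmod_add_mul_fdiv ((k : Int) * (m - 1)) n
  have h2 : 1 + PySem.Int.mod ((k : Int) * (m - 1)) n + m - 2
      = ((k : Int) + 1) * (m - 1) + n * (-(Int.fdiv ((k : Int) * (m - 1)) n)) := by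
    simp only [PySem.Int.mod] at *; ring_nf; ring_nf at h; linarith
  rw [h2]; simp only [PySem.Int.mod]; exact Int.add_mul_fmod_self_left _ _ _

lemma loop_spec (n m : Int) (hn : n ≠ 0) :
    ∀ (r j f : Nat) (acc : List Int), j + r = cycLen n m → 0 < r → r ≤ f →
      circularLoopA n m f (1 + PySem.Int.mod ((j : Int) * (m - 1)) n) acc
        = acc ++ (List.range r).map (fun t => 1 + PySem.Int.mod (((j + t : Nat) : Int) * (m - 1)) n) := by
  intro r
  induction r with
  | zero => omega
  | succ r' ih =>
    intro j f acc hjr hr hf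
    obtain ⟨f', rfl⟩ : ∃ f', f = f' + 1 := ⟨f - 1, by omega⟩
    show circularLoopA n m (Nat.succ f') _ acc = _
    simp only [circularLoopA]
    have hstep : PySem.Int.mod (1 + PySem.Int.mod ((j : Int) * (m - 1)) n + m - 2) n
        = PySem.Int.mod (((j : Int) + 1) * (m - 1)) n := step_eq n m j
    rcases Nat.eq_zero_or_pos r' with hr0 | hrpos
    · -- last iteration: j + 1 = cycLen, so i' = 1 and the loop breaks
      subst hr0
      have hdvd : n ∣ ((j + 1 : Nat) : Int) * (m - 1) := by
        rw [dvd_iff_cyc n m hn (j + 1)]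
        have : j + 1 = cycLen n m := by omega
        rw [this]
      have hmod0 : PySem.Int.mod (((j : Int) + 1) * (m - 1)) n = 0 := by
        have := Int.fmod_eq_zero_of_dvd (by push_cast at hdvd ⊢; exact hdvd)
        simpa [PySem.Int.mod] using this
      rw [hstep, hmod0]
      simp [List.range_succ]
    · -- middle iteration: 0 < j+1 < cycLen, so i' ≠ 1 and the loop recurses
      have hndvd : ¬ n ∣ ((j + 1 : Nat) : Int) * (m - 1) := by
        rw [dvd_iff_cyc n m hn (j + 1)]
        intro hdvd
        have := Nat.le_of_dvd (by omega) hdvd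
        omega
      have hmodne : PySem.Int.mod (((j : Int) + 1) * (m - 1)) n ≠ 0 := by
        intro h0
        apply hndvd
        push_cast
        exact (PySem.Int.mod_eq_zero_iff_dvd _ _).mp h0
      rw [hstep]
      rw [if_neg (by intro h; apply hmodne; omega)]
      have ihh := ih (j + 1) f' (acc ++ [1 + PySem.Int.mod ((j : Int) * (m - 1)) n])
        (by omega) hrpos (by omega)
      have hcast : ((j + 1 : Nat) : Int) = (j : Int) + 1 := by push_cast; ring
      rw [hcast] at ihh
      rw [ihh]
      rw [List.range_succ_eq_map]
      simp only [List.map_cons, List.map_map, List.append_assoc, List.cons_append,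
        List.nil_append, Nat.add_zero]
      congr 2
      apply List.map_congr_left
      intro a _
      have : j + 1 + a = j + a.succ := by omega
      simp [Function.comp, this]

lemma portA_closed (n m : Int) (hn : n ≠ 0) :
    circular_array_path n m
      = (List.range (cycLen n m)).map (fun t : Nat => 1 + PySem.Int.mod ((t : Int) * (m - 1)) n) := by
  unfold circular_array_path
  have h := loop_spec n m hn (cycLen n m) 0 n.natAbs [] (by omega) (cycLen_pos n m hn)
    (Nat.div_le_self _ _)
  simp only [Nat.cast_zero, Int.zero_mul, Nat.zero_add, List.nil_append] at h
  have h0 : (1 : Int) + PySem.Int.mod 0 n = 1 := by simp [PySem.Int.mod]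
  rw [h0] at h
  exact h

lemma portB_closed (n m : Int) (hn : n ≠ 0) :
    circular_array_path_alt n m
      = (List.range (cycLen n m)).map (fun t : Nat => 1 + PySem.Int.mod ((t : Int) * (m - 1)) n) := by
  unfold circular_array_path_alt
  simp only []
  rw [pyGcd_eq]
  have hgpos : (0 : Int) < (Int.gcd n (m - 1) : Int) := by
    exact_mod_cast Nat.gcd_pos_of_pos_left _ (Int.natAbs_pos.mpr hn)
  rw [PySem.Int.floordiv_eq_ediv_of_pos hgpos]
  have habs : |n| = (n.natAbs : Int) := Int.abs_eq_natAbs n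
  rw [habs, ← Int.natCast_ediv]
  have hcyc : n.natAbs / Int.gcd n (m - 1) = cycLen n m := rfl
  rw [hcyc, PySem.List.pyRange_zero_natCast, List.map_map]
  apply List.map_congr_left
  intro k _
  simp only [Function.comp]
  congr 1
  have hrw : (k : Int) * PySem.Int.mod (m - 1) n
      = (k : Int) * (m - 1) + n * ((k : Int) * (-(Int.fdiv (m - 1) n))) := by
    have h := Int.fmod_add_mul_fdiv (m - 1) n
    simp only [PySem.Int.mod]
    linear_combination (k : Int) * h
  rw [hrw]
  simp only [PySem.Int.mod]
  exact Int.add_mul_fmod_self_left _ _ _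

-- ===== VERDICT (by name: the statement is the Claim_ definition above) =====
theorem circular_array_path_spec : Claim_equal_circular_array_path := by
  intro n m _ hn
  unfold Spec_circular_array_path
  rw [portA_closed n m hn, portB_closed n m hn]
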